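-- pv_equiv track=rewrite | github.com/douzujun/Python-Foundation-Suda | 苏大上机代码/python_project/03_历年真题期末期中/RealExercise3/py16_yan_2018.py | getDivisorNum
-- ===== SOURCE A (Python) =====
-- def getDivisorNum(num26Lst):
--     resultLst = []
--     for numb in num26Lst:
--         t = numb
--         i = 2
--         while i < t:
--             if t % i == 0:
--                 resultLst.append(i)
--             i = i + 1
--     return resultLst
-- ===== SOURCE B (Python) =====
-- def getDivisorNum(num26Lst):
--     resultLst = []
--     for n in num26Lst:
--         small = []
--         large = []
--         d = 2
--         while d * d <= n:
--             if n % d == 0: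
--                 small.append(d)
--                 q = n // d
--                 if q != d:
--                     large.append(q)
--             d += 1
--         resultLst.extend(small)
--         resultLst.extend(reversed(large))
--     return resultLst
-- ===== Notes on version B (the rewrite author's own statement) =====
-- stated objective: faster
-- what changed: B enumerates divisors by sqrt(n) factor-pairs (collecting d and n//d up to d*d<=n, then appending the large cofactors in reverse) instead of A's linear trial of every i in [2,n).
import Mathlib
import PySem

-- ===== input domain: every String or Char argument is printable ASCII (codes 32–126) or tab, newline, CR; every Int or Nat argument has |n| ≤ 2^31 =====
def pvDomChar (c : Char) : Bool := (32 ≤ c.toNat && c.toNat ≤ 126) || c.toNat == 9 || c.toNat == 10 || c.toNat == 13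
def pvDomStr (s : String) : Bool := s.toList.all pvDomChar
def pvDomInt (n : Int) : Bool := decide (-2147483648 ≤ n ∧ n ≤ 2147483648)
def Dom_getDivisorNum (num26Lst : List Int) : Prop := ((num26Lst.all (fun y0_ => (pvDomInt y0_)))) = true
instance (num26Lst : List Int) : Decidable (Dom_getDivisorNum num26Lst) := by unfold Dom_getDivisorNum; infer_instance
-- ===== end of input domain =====

-- B finds each number's proper divisors by sqrt(n) factor-pairs (small divisor d and cofactor n//d) instead of A's trial of every i in [2, n).

-- ===== PORT A =====
-- A's inner while loop: i from 2 while i < t, appending i when t % i == 0.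
def aLoop (t i : Int) (acc : List Int) : List Int :=
  if _h : i < t then
    aLoop t (i + 1) (if PySem.Int.mod t i = 0 then acc ++ [i] else acc)
  else acc
termination_by (t - i).toNat
decreasing_by omega

def getDivisorNum (num26Lst : List Int) : List Int :=
  num26Lst.foldl (fun resultLst numb => aLoop numb 2 resultLst) []

-- ===== PORT B =====
-- fact needed for bLoop's termination
lemma pv_sq_le_imp_le {d n : Int} (h : d * d ≤ n) : d ≤ n := by
  rcases le_total d 0 with hd | hd
  · nlinarith
  · nlinarith

-- B's inner while loop: d while d*d <= n, collecting small divisors and large cofactors.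
def bLoop (n d : Int) (small large : List Int) : List Int × List Int :=
  if h : d * d ≤ n then
    if PySem.Int.mod n d = 0 then
      bLoop n (d + 1) (small ++ [d])
        (if PySem.Int.floordiv n d ≠ d then large ++ [PySem.Int.floordiv n d] else large)
    else bLoop n (d + 1) small large
  else (small, large)
termination_by (n + 1 - d).toNat
decreasing_by
  · have := pv_sq_le_imp_le h; omega
  · have := pv_sq_le_imp_le h; omega

def getDivisorNum_alt (num26Lst : List Int) : List Int :=
  num26Lst.foldl (fun resultLst n =>
    let p := bLoop n 2 [] []
    (resultLst ++ p.1) ++ p.2.reverse) []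

-- ===== PRECONDITION & SPEC =====
def Spec_getDivisorNum (num26Lst : List Int) (out : List Int) : Prop := out = getDivisorNum_alt num26Lst
instance (num26Lst : List Int) (out : List Int) : Decidable (Spec_getDivisorNum num26Lst out) := by unfold Spec_getDivisorNum; infer_instance

-- ===== CLAIM (what is proved, stated in full; the proofs are below) =====
def Claim_equal_getDivisorNum : Prop := ∀ (num26Lst : List Int), Dom_getDivisorNum num26Lst → Spec_getDivisorNum num26Lst (getDivisorNum num26Lst)

-- ===== LEMMAS AND PROOFS =====

lemma aLoop_step (t i : Int) (acc : List Int) (h : i < t) :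
    aLoop t i acc = aLoop t (i + 1) (if PySem.Int.mod t i = 0 then acc ++ [i] else acc) := by
  rw [aLoop]; simp [h]

lemma aLoop_stop (t i : Int) (acc : List Int) (h : ¬ i < t) : aLoop t i acc = acc := by
  rw [aLoop]; simp [h]

lemma aLoop_append (t : Int) : ∀ (k : Nat) (i : Int) (acc : List Int), (t - i).toNat = k →
    aLoop t i acc = acc ++ aLoop t i [] := by
  intro k
  induction k with
  | zero =>
    intro i acc hk
    have h : ¬ i < t := by omega
    rw [aLoop_stop t i acc h, aLoop_stop t i [] h]
    simp
  | succ k ih =>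
    intro i acc hk
    have hlt : i < t := by omega
    have hk1 : (t - (i + 1)).toNat = k := by omega
    rw [aLoop_step t i acc hlt, aLoop_step t i [] hlt,
        ih (i + 1) (if PySem.Int.mod t i = 0 then acc ++ [i] else acc) hk1,
        ih (i + 1) (if PySem.Int.mod t i = 0 then [] ++ [i] else []) hk1]
    by_cases hm : PySem.Int.mod t i = 0 <;> simp [hm]

lemma aLoop_char (t : Int) : ∀ (k : Nat) (i : Int), (t - i).toNat = k → 1 ≤ i →
    (aLoop t i []).Pairwise (· < ·) ∧ ∀ x, x ∈ aLoop t i [] ↔ i ≤ x ∧ x < t ∧ x ∣ t := by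
  intro k
  induction k with
  | zero =>
    intro i hk hi
    have h : ¬ i < t := by omega
    rw [aLoop_stop t i [] h]
    refine ⟨List.Pairwise.nil, ?_⟩
    intro x
    simp only [List.not_mem_nil, false_iff]
    rintro ⟨h1, h2, -⟩; omega
  | succ k ih =>
    intro i hk hi
    have hlt : i < t := by omega
    have hk1 : (t - (i + 1)).toNat = k := by omega
    obtain ⟨hp, hmem⟩ := ih (i + 1) hk1 (by omega)
    have hstep : aLoop t i [] = (if PySem.Int.mod t i = 0 then [i] else []) ++ aLoop t (i + 1) [] := by
      rw [aLoop_step t i [] hlt,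
          aLoop_append t k (i + 1) (if PySem.Int.mod t i = 0 then [] ++ [i] else []) hk1]
      by_cases hm : PySem.Int.mod t i = 0 <;> simp [hm]
    rw [hstep]
    by_cases hm : PySem.Int.mod t i = 0
    · have hdvd : i ∣ t := (PySem.Int.mod_eq_zero_iff_dvd t i).mp hm
      rw [if_pos hm]
      simp only [List.singleton_append]
      constructor
      · exact List.Pairwise.cons (fun y hy => by have := (hmem y).mp hy; omega) hp
      · intro x
        simp only [List.mem_cons, hmem]
        constructor
        · rintro (rfl | ⟨h1, h2, h3⟩)
          · exact ⟨le_refl _, hlt, hdvd⟩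
          · exact ⟨by omega, h2, h3⟩
        · rintro ⟨h1, h2, h3⟩
          rcases eq_or_lt_of_le h1 with rfl | h
          · exact Or.inl rfl
          · exact Or.inr ⟨by omega, h2, h3⟩
    · have hndvd : ¬ i ∣ t := fun h => hm ((PySem.Int.mod_eq_zero_iff_dvd t i).mpr h)
      rw [if_neg hm]
      simp only [List.nil_append]
      refine ⟨hp, fun x => ?_⟩
      rw [hmem]
      constructor
      · rintro ⟨h1, h2, h3⟩; exact ⟨by omega, h2, h3⟩
      · rintro ⟨h1, h2, h3⟩
        refine ⟨?_, h2, h3⟩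
        rcases eq_or_lt_of_le h1 with rfl | h
        · exact absurd h3 hndvd
        · omega

lemma bLoop_step (n d : Int) (s l : List Int) (h : d * d ≤ n) :
    bLoop n d s l = if PySem.Int.mod n d = 0 then
        bLoop n (d + 1) (s ++ [d])
          (if PySem.Int.floordiv n d ≠ d then l ++ [PySem.Int.floordiv n d] else l)
      else bLoop n (d + 1) s l := by
  rw [bLoop]; simp [h]

lemma bLoop_stop (n d : Int) (s l : List Int) (h : ¬ d * d ≤ n) :
    bLoop n d s l = (s, l) := by
  rw [bLoop]; simp [h]

lemma bLoop_append (n : Int) : ∀ (k : Nat) (d : Int) (s l : List Int), (n + 1 - d).toNat = k →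
    bLoop n d s l = (s ++ (bLoop n d [] []).1, l ++ (bLoop n d [] []).2) := by
  intro k
  induction k with
  | zero =>
    intro d s l hk
    have h : ¬ d * d ≤ n := fun h => by have := pv_sq_le_imp_le h; omega
    rw [bLoop_stop n d s l h, bLoop_stop n d [] [] h]
    simp
  | succ k ih =>
    intro d s l hk
    by_cases h : d * d ≤ n
    · have hk1 : (n + 1 - (d + 1)).toNat = k := by have := pv_sq_le_imp_le h; omega
      rw [bLoop_step n d s l h, bLoop_step n d [] [] h]
      by_cases hm : PySem.Int.mod n d = 0
      · simp only [hm, if_pos]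
        rw [ih (d + 1) _ _ hk1, ih (d + 1) ([] ++ [d]) _ hk1]
        by_cases hq : PySem.Int.floordiv n d ≠ d <;> simp [hq]
      · simp only [hm]
        rw [ih (d + 1) s l hk1, ih (d + 1) [] [] hk1]
        simp
    · rw [bLoop_stop n d s l h, bLoop_stop n d [] [] h]
      simp

lemma bLoop_char (n : Int) (hn : 0 < n) : ∀ (k : Nat) (d : Int), (n + 1 - d).toNat = k → 2 ≤ d →
    (bLoop n d [] []).1.Pairwise (· < ·) ∧
    (∀ x, x ∈ (bLoop n d [] []).1 ↔ d ≤ x ∧ x * x ≤ n ∧ x ∣ n) ∧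
    (bLoop n d [] []).2.Pairwise (· > ·) ∧
    (∀ x, x ∈ (bLoop n d [] []).2 ↔ 0 < x ∧ x ∣ n ∧ n < x * x ∧ x * d ≤ n) := by
  intro k
  induction k with
  | zero =>
    intro d hk hd
    have hdn : n < d := by omega
    have h : ¬ d * d ≤ n := fun h => by have := pv_sq_le_imp_le h; omega
    rw [bLoop_stop n d [] [] h]
    refine ⟨List.Pairwise.nil, fun x => ?_, List.Pairwise.nil, fun x => ?_⟩
    · simp only [List.not_mem_nil, false_iff]
      rintro ⟨h1, h2, -⟩
      nlinarith [sq_nonneg (d - 1), mul_le_mul h1 h1 (by omega : (0:Int) ≤ d) (by omega : (0:Int) ≤ x)]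
    · simp only [List.not_mem_nil, false_iff]
      rintro ⟨h1, -, -, h4⟩
      nlinarith [mul_nonneg (show (0:Int) ≤ x - 1 by omega) (show (0:Int) ≤ d by omega)]
  | succ k ih =>
    intro d hk hd
    by_cases h : d * d ≤ n
    · have hk1 : (n + 1 - (d + 1)).toNat = k := by have := pv_sq_le_imp_le h; omega
      obtain ⟨hp1, hm1, hp2, hm2⟩ := ih (d + 1) hk1 (by omega)
      by_cases hm : PySem.Int.mod n d = 0
      · have hdvd : d ∣ n := (PySem.Int.mod_eq_zero_iff_dvd n d).mp hm
        obtain ⟨q, hnq⟩ := hdvd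
        have hd0 : (0:Int) < d := by omega
        have hfd : PySem.Int.floordiv n d = q := by
          rw [PySem.Int.floordiv_eq_ediv_of_pos hd0, hnq, Int.mul_ediv_cancel_left q (by omega)]
        have hq0 : 0 < q := by nlinarith
        have hqd : d ≤ q := by nlinarith
        rw [bLoop_step n d [] [] h, if_pos hm, hfd,
            bLoop_append n k (d + 1) ([] ++ [d]) (if q ≠ d then [] ++ [q] else []) hk1]
        constructor
        · -- small pairwise
          simp only [List.nil_append, List.singleton_append]
          exact List.Pairwise.cons (fun y hy => by have := (hm1 y).mp hy; omega) hp1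
        refine ⟨fun x => ?_, ?_, fun x => ?_⟩
        · -- small membership
          simp only [List.nil_append, List.singleton_append, List.mem_cons, hm1]
          constructor
          · rintro (rfl | ⟨h1, h2, h3⟩)
            · exact ⟨le_refl _, h, ⟨q, hnq⟩⟩
            · exact ⟨by omega, h2, h3⟩
          · rintro ⟨h1, h2, h3⟩
            rcases eq_or_lt_of_le h1 with rfl | hlt
            · exact Or.inl rfl
            · exact Or.inr ⟨by omega, h2, h3⟩
        · -- large pairwise
          by_cases hqd' : q ≠ d
          · simp only [if_pos hqd', List.nil_append, List.singleton_append]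
            refine List.Pairwise.cons (fun y hy => ?_) hp2
            obtain ⟨hy0, -, -, hy4⟩ := (hm2 y).mp hy
            nlinarith
          · simp only [if_neg hqd', List.nil_append]
            exact hp2
        · -- large membership
          by_cases hqd' : q ≠ d
          · have hqgt : d < q := lt_of_le_of_ne hqd (Ne.symm hqd')
            simp only [if_pos hqd', List.nil_append, List.singleton_append, List.mem_cons, hm2]
            constructor
            · rintro (rfl | ⟨h1, h2, h3, h4⟩)
              · exact ⟨hq0, ⟨d, by rw [hnq]; ring⟩, by nlinarith, by nlinarith⟩
              · exact ⟨h1, h2, h3, by nlinarith⟩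
            · rintro ⟨h1, h2, h3, h4⟩
              by_cases h5 : x * (d + 1) ≤ n
              · exact Or.inr ⟨h1, h2, h3, h5⟩
              · obtain ⟨m, hmx⟩ := h2
                have hmd : m = d := by nlinarith
                left
                have : n = x * d := by rw [hmx, hmd]
                nlinarith
          · have hqd'' : q = d := by simpa using hqd'
            simp only [if_neg hqd', List.nil_append, hm2]
            have hnd : n = d * d := by rw [hnq, hqd'']
            constructor
            · rintro ⟨h1, h2, h3, h4⟩
              exact ⟨h1, h2, h3, by nlinarith⟩
            · rintro ⟨h1, h2, h3, h4⟩
              exfalso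
              have hxd : x ≤ d := by nlinarith
              nlinarith
      · have hndvd : ¬ d ∣ n := fun hdvd => hm ((PySem.Int.mod_eq_zero_iff_dvd n d).mpr hdvd)
        rw [bLoop_step n d [] [] h, if_neg hm]
        
        refine ⟨hp1, fun x => ?_, hp2, fun x => ?_⟩
        · rw [hm1]
          constructor
          · rintro ⟨h1, h2, h3⟩; exact ⟨by omega, h2, h3⟩
          · rintro ⟨h1, h2, h3⟩
            refine ⟨?_, h2, h3⟩
            rcases eq_or_lt_of_le h1 with rfl | hlt
            · exact absurd h3 hndvd
            · omega
        · rw [hm2]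
          constructor
          · rintro ⟨h1, h2, h3, h4⟩; exact ⟨h1, h2, h3, by nlinarith⟩
          · rintro ⟨h1, h2, h3, h4⟩
            refine ⟨h1, h2, h3, ?_⟩
            by_contra h5
            obtain ⟨m, hmx⟩ := h2
            have hmd : m = d := by nlinarith
            exact hndvd ⟨x, by rw [hmx, hmd]; ring⟩
    · rw [bLoop_stop n d [] [] h]
      refine ⟨List.Pairwise.nil, fun x => ?_, List.Pairwise.nil, fun x => ?_⟩
      · simp only [List.not_mem_nil, false_iff]
        rintro ⟨h1, h2, -⟩
        nlinarith
      · simp only [List.not_mem_nil, false_iff]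
        rintro ⟨h1, h2, h3, h4⟩
        obtain ⟨m, hmx⟩ := h2
        have hmd : d ≤ m := by nlinarith
        have hmx' : m < x := by nlinarith
        nlinarith

lemma sorted_ext : ∀ (a b : List Int), a.Pairwise (· < ·) → b.Pairwise (· < ·) →
    (∀ x, x ∈ a ↔ x ∈ b) → a = b := by
  intro a
  induction a with
  | nil =>
    intro b _ _ h
    cases b with
    | nil => rfl
    | cons y ys => exact absurd ((h y).mpr List.mem_cons_self) (List.not_mem_nil)
  | cons x xs ih =>
    intro b ha hb h
    cases b with
    | nil => exact absurd ((h x).mp List.mem_cons_self) (List.not_mem_nil)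
    | cons y ys =>
      obtain ⟨hax, hxs⟩ := List.pairwise_cons.mp ha
      obtain ⟨hby, hys⟩ := List.pairwise_cons.mp hb
      have hxy : x = y := by
        have h1 := (h x).mp List.mem_cons_self
        have h2 := (h y).mpr List.mem_cons_self
        rcases List.mem_cons.mp h1 with h1 | h1
        · exact h1
        · rcases List.mem_cons.mp h2 with h2 | h2
          · exact h2.symm
          · have := hby x h1; have := hax y h2; omega
      subst hxy
      congr 1
      apply ih ys hxs hys
      intro z
      constructor
      · intro hz
        have := hax z hz
        rcases List.mem_cons.mp ((h z).mp (List.mem_cons_of_mem x hz)) with rfl | h2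
        · omega
        · exact h2
      · intro hz
        have := hby z hz
        rcases List.mem_cons.mp ((h z).mpr (List.mem_cons_of_mem x hz)) with rfl | h2
        · omega
        · exact h2

lemma block_eq (n : Int) : aLoop n 2 [] = (bLoop n 2 [] []).1 ++ (bLoop n 2 [] []).2.reverse := by
  by_cases hn : n ≤ 0
  · have h1 : ¬ (2:Int) < n := by omega
    have h2 : ¬ (2:Int) * 2 ≤ n := by omega
    rw [aLoop_stop n 2 [] h1, bLoop_stop n 2 [] [] h2]
    simp
  · replace hn : 0 < n := by omega
    obtain ⟨hpa, hma⟩ := aLoop_char n (n - 2).toNat 2 rfl (by omega)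
    obtain ⟨hp1, hm1, hp2, hm2⟩ := bLoop_char n hn (n + 1 - 2).toNat 2 rfl (le_refl _)
    apply sorted_ext _ _ hpa
    · rw [List.pairwise_append]
      refine ⟨hp1, ?_, ?_⟩
      · rw [List.pairwise_reverse]
        exact hp2.imp (fun h => h)
      · intro x hx y hy
        obtain ⟨hx1, hx2, -⟩ := (hm1 x).mp hx
        obtain ⟨hy1, -, hy3, -⟩ := (hm2 y).mp (List.mem_reverse.mp hy)
        nlinarith
    · intro x
      rw [hma, List.mem_append, List.mem_reverse, hm1 x, hm2 x]
      constructor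
      · rintro ⟨h1, h2, h3⟩
        by_cases h4 : x * x ≤ n
        · exact Or.inl ⟨h1, h4, h3⟩
        · refine Or.inr ⟨by omega, h3, by omega, ?_⟩
          obtain ⟨m, hmx⟩ := h3
          have hm0 : 0 < m := by nlinarith
          have hm1' : m ≠ 1 := fun hm1 => by rw [hm1, mul_one] at hmx; omega
          have hm2' : 2 ≤ m := by omega
          nlinarith
      · rintro (⟨h1, h2, h3⟩ | ⟨h1, h2, h3, h4⟩)
        · refine ⟨h1, ?_, h3⟩
          nlinarith
        · have hx2 : 2 < x := by nlinarith
          exact ⟨by omega, by omega, h2⟩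

-- ===== VERDICT (by name: the statement is the Claim_ definition above) =====
theorem getDivisorNum_spec : Claim_equal_getDivisorNum := by
  unfold Claim_equal_getDivisorNum Spec_getDivisorNum
  intro xs _
  show getDivisorNum xs = getDivisorNum_alt xs
  unfold getDivisorNum getDivisorNum_alt
  have key : ∀ (l : List Int) (acc : List Int),
      l.foldl (fun resultLst numb => aLoop numb 2 resultLst) acc =
      l.foldl (fun resultLst n => let p := bLoop n 2 [] []; (resultLst ++ p.1) ++ p.2.reverse) acc := by
    intro l
    induction l with
    | nil => intro acc; rfl
    | cons hd tl ih =>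
      intro acc
      simp only [List.foldl_cons]
      rw [ih]
      congr 1
      rw [aLoop_append hd (hd - 2).toNat 2 acc rfl, block_eq hd, List.append_assoc]
  exact key xs []
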